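-- pv_equiv track=rewrite | github.com/edoardo-crypto/Customer-Success | enrich_gap_contacts.py | best_contact
-- ===== SOURCE A (Python) =====
-- def best_contact(contacts):
--     """
--     Given a list of contact dicts, pick the best one.
--     Prefer contacts with both email AND phone; then email-only; then phone-only.
--     """
--     if not contacts:
--         return None
--     has_both  = [c for c in contacts if c.get("email") and c.get("phone")]
--     has_email = [c for c in contacts if c.get("email")]
--     if has_both:
--         return has_both[0]
--     if has_email:
--         return has_email[0]
--     return contacts[0]
-- ===== SOURCE B (Python) =====
-- def best_contact(contacts):
--     if not contacts:
--         return None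
--     first_email = None
--     for c in contacts:
--         e = bool(c.get("email"))
--         if e and c.get("phone"):
--             return c
--         if first_email is None and e:
--             first_email = c
--     return first_email if first_email is not None else contacts[0]
-- ===== Notes on version B (the rewrite author's own statement) =====
-- stated objective: alternative
-- what changed: Replaces A's two full filtering passes that build has_both/has_email lists with a single early-exiting scan that returns the first both-email-and-phone contact immediately and otherwise remembers only the first email-only candidate.
import Mathlib
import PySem

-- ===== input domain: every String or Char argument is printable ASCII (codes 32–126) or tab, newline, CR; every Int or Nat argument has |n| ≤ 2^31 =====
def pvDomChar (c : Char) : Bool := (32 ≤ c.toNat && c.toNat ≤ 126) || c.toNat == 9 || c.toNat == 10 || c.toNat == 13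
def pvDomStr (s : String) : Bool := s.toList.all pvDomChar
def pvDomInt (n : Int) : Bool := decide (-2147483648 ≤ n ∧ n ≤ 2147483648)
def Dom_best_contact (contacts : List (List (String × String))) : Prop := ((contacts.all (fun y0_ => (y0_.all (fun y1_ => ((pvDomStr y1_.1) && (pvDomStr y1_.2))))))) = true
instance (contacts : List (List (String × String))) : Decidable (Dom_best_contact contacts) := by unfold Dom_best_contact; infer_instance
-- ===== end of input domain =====

-- B replaces A's two list-building filter passes with one early-exiting scan keeping only the first email candidate (objective: alternative decomposition).

-- shared helper: truthiness of c.get(k) — some non-empty string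
def pvTruthy (c : List (String × String)) (k : String) : Bool :=
  match (PySem.Dict.mk c).get? k with
  | some s => !(s == "")
  | none => false

-- ===== PORT A =====
def best_contact (contacts : List (List (String × String))) : Option (List (String × String)) :=
  if contacts.isEmpty then none
  else
    let has_both := contacts.filter (fun c => pvTruthy c "email" && pvTruthy c "phone")
    let has_email := contacts.filter (fun c => pvTruthy c "email")
    match has_both with
    | c :: _ => some c
    | [] =>
      match has_email with
      | c :: _ => some c
      | [] => PySem.List.pyGet? contacts 0

-- ===== PORT B =====
-- the for-loop of Source B: early return on email∧phone, else remember the first email contact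
def pvBcLoop (xs : List (List (String × String))) (firstEmail : Option (List (String × String))) :
    Option (List (String × String)) :=
  match xs with
  | [] => firstEmail
  | c :: rest =>
    let e := pvTruthy c "email"
    if e && pvTruthy c "phone" then some c
    else pvBcLoop rest (if firstEmail.isNone && e then some c else firstEmail)

def best_contact_alt (contacts : List (List (String × String))) : Option (List (String × String)) :=
  match contacts with
  | [] => none
  | c0 :: _ =>
    match pvBcLoop contacts none with
    | some x => some x
    | none => some c0

-- ===== PRECONDITION & SPEC =====
def Spec_best_contact (contacts : List (List (String × String))) (out : Option (List (String × String))) : Prop := out = best_contact_alt contacts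
instance (contacts : List (List (String × String))) (out : Option (List (String × String))) : Decidable (Spec_best_contact contacts out) := by unfold Spec_best_contact; infer_instance

-- ===== CLAIM (what is proved, stated in full; the proofs are below) =====
def Claim_equal_best_contact : Prop := ∀ (contacts : List (List (String × String))), Dom_best_contact contacts → Spec_best_contact contacts (best_contact contacts)

-- ===== LEMMAS AND PROOFS =====

-- characterisation of the loop: a set accumulator is returned unless a both-contact appears;
-- an unset accumulator falls through to the first email contact
theorem pvBcLoop_spec (xs : List (List (String × String))) (acc : Option (List (String × String))) :
    pvBcLoop xs acc =
      match xs.filter (fun c => pvTruthy c "email" && pvTruthy c "phone") with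
      | c :: _ => some c
      | [] =>
        match acc with
        | some a => some a
        | none => (xs.filter (fun c => pvTruthy c "email")).head? := by
  induction xs generalizing acc with
  | nil => cases acc <;> simp [pvBcLoop]
  | cons c rest ih =>
    simp only [pvBcLoop, List.filter_cons]
    by_cases hb : (pvTruthy c "email" && pvTruthy c "phone") = true
    · simp [hb]
    · have he' : pvTruthy c "phone" = false ∨ pvTruthy c "email" = false := by
        cases h1 : pvTruthy c "email" <;> cases h2 : pvTruthy c "phone" <;>
          simp_all
      by_cases he : pvTruthy c "email" = true
      · have hp : pvTruthy c "phone" = false := by simpa [he] using hb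
        cases acc with
        | none => simp [he, hp, ih]
        | some a => simp [he, hp, ih]
      · simp at he
        cases acc with
        | none => simp [he, ih]
        | some a => simp [he, ih]

theorem best_contact_spec : Claim_equal_best_contact := by
  unfold Claim_equal_best_contact
  intro contacts _
  unfold Spec_best_contact
  cases contacts with
  | nil => rfl
  | cons c0 rest =>
    simp only [best_contact, best_contact_alt, List.isEmpty_cons, pvBcLoop_spec]
    cases hB : (c0 :: rest).filter (fun c => pvTruthy c "email" && pvTruthy c "phone") with
    | cons b _ => simp
    | nil =>
      cases hE : (c0 :: rest).filter (fun c => pvTruthy c "email") with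
      | cons e _ => simp
      | nil => simp [PySem.List.pyGet?, PySem.List.pyIdx?]
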